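-- pv_equiv track=rewrite | github.com/unclefish7/code-audit | src/candidate_extractor.py | _split_top_level_tuples
-- ===== SOURCE A (Python) =====
-- from typing import Any, Dict, List
--
-- def _split_top_level_tuples(list_region: str) -> List[str]:
--     tuples: List[str] = []
--     depth = 0
--     start = -1
--     i = 0
--     in_quote = False
--     in_triple = False
--
--     while i < len(list_region):
--         ch = list_region[i]
--         nxt3 = list_region[i : i + 3]
--
--         if in_triple:
--             if nxt3 == '"""':
--                 in_triple = False
--                 i += 3
--                 continue
--             i += 1
--             continue
--
--         if in_quote:
--             if ch == "\\":
--                 i += 2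
--                 continue
--             if ch == '"':
--                 in_quote = False
--             i += 1
--             continue
--
--         if nxt3 == '"""':
--             in_triple = True
--             i += 3
--             continue
--
--         if ch == '"':
--             in_quote = True
--             i += 1
--             continue
--
--         if ch == '(':
--             if depth == 0:
--                 start = i
--             depth += 1
--         elif ch == ')':
--             depth -= 1
--             if depth == 0 and start >= 0:
--                 tuples.append(list_region[start : i + 1])
--                 start = -1
--         i += 1
--
--     return tuples
-- ===== SOURCE B (Python) =====
-- from typing import List
--
--
-- def _code_indices(s: str) -> List[int]:
--     """First pass: indices of the characters that lie outside string literals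
--     (quote delimiters/escapes themselves are not code).  mode is a small
--     state machine: 0 = code, 1 = inside a "..." literal, 2 = inside a triple."""
--     idx: List[int] = []
--     i = 0
--     mode = 0
--     n = len(s)
--     while i < n:
--         if mode == 2:
--             if s[i : i + 3] == '"""':
--                 mode = 0
--                 i += 3
--             else:
--                 i += 1
--         elif mode == 1:
--             if s[i] == "\\":
--                 i += 2
--             elif s[i] == '"':
--                 mode = 0
--                 i += 1
--             else:
--                 i += 1
--         elif s[i : i + 3] == '"""':
--             mode = 2
--             i += 3
--         elif s[i] == '"':
--             mode = 1
--             i += 1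
--         else:
--             idx.append(i)
--             i += 1
--     return idx
--
--
-- def _split_top_level_tuples(list_region: str) -> List[str]:
--     # Second pass: fold the paren-depth bookkeeping over the code indices only.
--     out: List[str] = []
--     depth = 0
--     start = None
--     for i in _code_indices(list_region):
--         ch = list_region[i]
--         if ch == '(':
--             if depth == 0:
--                 start = i
--             depth += 1
--         elif ch == ')':
--             depth -= 1
--             if depth == 0 and start is not None:
--                 out.append(list_region[start : i + 1])
--                 start = None
--     return out
-- ===== Notes on version B (the rewrite author's own statement) =====
-- stated objective: alternative
-- what changed: Replaces A's single interleaved scanner (two boolean quote flags, Int sentinel start=-1, fused paren logic) with two staged passes: a three-state (mode 0/1/2) string-literal scanner that first computes the list of code indices, then a fold over that index list doing only paren-depth extraction with an Option start instead of the -1 sentinel.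
import Mathlib
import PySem

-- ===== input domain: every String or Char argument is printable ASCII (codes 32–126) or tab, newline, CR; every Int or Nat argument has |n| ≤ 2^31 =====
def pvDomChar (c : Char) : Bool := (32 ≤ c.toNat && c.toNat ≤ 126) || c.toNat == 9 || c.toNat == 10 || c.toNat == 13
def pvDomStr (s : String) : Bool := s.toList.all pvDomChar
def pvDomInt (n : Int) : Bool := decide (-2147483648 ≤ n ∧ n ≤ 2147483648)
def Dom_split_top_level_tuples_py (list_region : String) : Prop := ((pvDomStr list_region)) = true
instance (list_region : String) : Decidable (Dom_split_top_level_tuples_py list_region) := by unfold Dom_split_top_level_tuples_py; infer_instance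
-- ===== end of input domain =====

-- B splits A's fused scanner into two staged passes: a three-state literal scanner producing the
-- code-index list, then a fold extracting tuples over those indices; alternative decomposition.

-- ===== PORT A =====
-- A's while-loop, step for step; i only grows, fuel = s.length is a totality device only.
-- nxt3 = list_region[i:i+3] clamps at the end exactly like (s.drop i).take 3.
def loopA (s : List Char) : Nat → List String → Int → Int → Nat → Bool → Bool → List String
  | 0, tuples, _, _, _, _, _ => tuples
  | fuel + 1, tuples, depth, start, i, in_quote, in_triple =>
    if h : i < s.length then
      let ch := s[i]
      let nxt3 := (s.drop i).take 3
      if in_triple then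
        if nxt3 = ['"', '"', '"'] then loopA s fuel tuples depth start (i + 3) in_quote false
        else loopA s fuel tuples depth start (i + 1) in_quote in_triple
      else if in_quote then
        if ch = '\\' then loopA s fuel tuples depth start (i + 2) in_quote in_triple
        else if ch = '"' then loopA s fuel tuples depth start (i + 1) false in_triple
        else loopA s fuel tuples depth start (i + 1) in_quote in_triple
      else if nxt3 = ['"', '"', '"'] then loopA s fuel tuples depth start (i + 3) in_quote true
      else if ch = '"' then loopA s fuel tuples depth start (i + 1) true in_triple
      else if ch = '(' then
        loopA s fuel tuples (depth + 1) (if depth = 0 then (i : Int) else start) (i + 1) in_quote in_triple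
      else if ch = ')' then
        if depth - 1 = 0 ∧ start ≥ 0 then
          loopA s fuel (tuples ++ [String.ofList (PySem.List.slice s (some start) (some ((i : Int) + 1)))])
            (depth - 1) (-1) (i + 1) in_quote in_triple
        else loopA s fuel tuples (depth - 1) start (i + 1) in_quote in_triple
      else loopA s fuel tuples depth start (i + 1) in_quote in_triple
    else tuples

def split_top_level_tuples_py (list_region : String) : List String :=
  loopA list_region.toList list_region.toList.length [] 0 (-1) 0 false false

-- ===== PORT B =====
-- Pass 1 of Source B: code indices via a three-state scanner (mode 0 = code, 1 = quote, 2 = triple).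
def codeIdxB (s : List Char) : Nat → Nat → Nat → List Nat
  | 0, _, _ => []
  | fuel + 1, i, mode =>
    if h : i < s.length then
      if mode = 2 then
        if (s.drop i).take 3 = ['"', '"', '"'] then codeIdxB s fuel (i + 3) 0
        else codeIdxB s fuel (i + 1) 2
      else if mode = 1 then
        if s[i] = '\\' then codeIdxB s fuel (i + 2) 1
        else if s[i] = '"' then codeIdxB s fuel (i + 1) 0
        else codeIdxB s fuel (i + 1) 1
      else if (s.drop i).take 3 = ['"', '"', '"'] then codeIdxB s fuel (i + 3) 2
      else if s[i] = '"' then codeIdxB s fuel (i + 1) 1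
      else i :: codeIdxB s fuel (i + 1) mode
    else []

-- Pass 2 of Source B: one fold step of the paren bookkeeping (out, depth, start) over a code index.
def stepB (s : List Char) (st : List String × Int × Option Nat) (i : Nat) :
    List String × Int × Option Nat :=
  let ch := s.getD i ' '
  if ch = '(' then
    (st.1, st.2.1 + 1, if st.2.1 = 0 then some i else st.2.2)
  else if ch = ')' then
    if st.2.1 - 1 = 0 ∧ st.2.2 ≠ none then
      (st.1 ++ [String.ofList (PySem.List.slice s (some ((st.2.2.getD 0 : Nat) : Int)) (some ((i : Int) + 1)))],
       st.2.1 - 1, none)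
    else (st.1, st.2.1 - 1, st.2.2)
  else st

def split_top_level_tuples_py_alt (list_region : String) : List String :=
  let cs := list_region.toList
  ((codeIdxB cs cs.length 0 0).foldl (stepB cs) ([], 0, none)).1

-- ===== PRECONDITION & SPEC =====
def Spec_split_top_level_tuples_py (list_region : String) (out : List String) : Prop := out = split_top_level_tuples_py_alt list_region
instance (list_region : String) (out : List String) : Decidable (Spec_split_top_level_tuples_py list_region out) := by unfold Spec_split_top_level_tuples_py; infer_instance

-- ===== CLAIM (what is proved, stated in full; the proofs are below) =====
def Claim_equal_split_top_level_tuples_py : Prop := ∀ (list_region : String), Dom_split_top_level_tuples_py list_region → Spec_split_top_level_tuples_py list_region (split_top_level_tuples_py list_region)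

-- ===== LEMMAS AND PROOFS =====

-- Proof-only intermediate: A's scanner with the paren logic split off but A's own state shape.
def codeIdx (s : List Char) : Nat → Nat → Bool → Bool → List Nat
  | 0, _, _, _ => []
  | fuel + 1, i, in_quote, in_triple =>
    if h : i < s.length then
      if in_triple then
        if (s.drop i).take 3 = ['"', '"', '"'] then codeIdx s fuel (i + 3) in_quote false
        else codeIdx s fuel (i + 1) in_quote in_triple
      else if in_quote then
        if s[i] = '\\' then codeIdx s fuel (i + 2) in_quote in_triple
        else if s[i] = '"' then codeIdx s fuel (i + 1) false in_triple
        else codeIdx s fuel (i + 1) in_quote in_triple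
      else if (s.drop i).take 3 = ['"', '"', '"'] then codeIdx s fuel (i + 3) in_quote true
      else if s[i] = '"' then codeIdx s fuel (i + 1) true in_triple
      else i :: codeIdx s fuel (i + 1) in_quote in_triple
    else []

-- Proof-only intermediate: recursive paren bookkeeping with A's Int start sentinel.
def pass2B (s : List Char) : List Nat → List String → Int → Int → List String
  | [], tuples, _, _ => tuples
  | i :: rest, tuples, depth, start =>
    let ch := s.getD i ' '
    if ch = '(' then
      pass2B s rest tuples (depth + 1) (if depth = 0 then (i : Int) else start)
    else if ch = ')' then
      if depth - 1 = 0 ∧ start ≥ 0 then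
        pass2B s rest (tuples ++ [String.ofList (PySem.List.slice s (some start) (some ((i : Int) + 1)))])
          (depth - 1) (-1)
      else pass2B s rest tuples (depth - 1) start
    else pass2B s rest tuples depth start

-- A's fused scan equals pass2B run over codeIdx's list, from any state and any fuel.
lemma loopA_eq_pass2B (s : List Char) :
    ∀ fuel i q t tuples depth start,
      loopA s fuel tuples depth start i q t = pass2B s (codeIdx s fuel i q t) tuples depth start := by
  intro fuel
  induction fuel with
  | zero => intro i q t tuples depth start; simp [loopA, codeIdx, pass2B]
  | succ n ih =>
    intro i q t tuples depth start
    rw [loopA, codeIdx]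
    by_cases h : i < s.length
    · simp only [h, dif_pos]
      by_cases ht : t
      · by_cases h3 : (s.drop i).take 3 = ['"', '"', '"'] <;> simp [ht, h3, ih]
      · by_cases hq : q
        · by_cases hb : s[i] = '\\'
          · simp [ht, hq, hb, ih]
          · by_cases hd : s[i] = '"' <;> simp [ht, hq, hb, hd, ih]
        · by_cases h3 : (s.drop i).take 3 = ['"', '"', '"']
          · simp [ht, hq, h3, ih]
          · by_cases hd : s[i] = '"'
            · simp [ht, hq, h3, hd, ih]
            · have hget : s[i]?.getD ' ' = s[i] := by simp [List.getElem?_eq_getElem h]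
              by_cases hop : s[i] = '('
              · simp [ht, hq, h3, hop, pass2B, hget, ih]
              · by_cases hcl : s[i] = ')'
                · by_cases hz : depth - 1 = 0 ∧ start ≥ 0 <;>
                    simp [ht, hq, h3, hcl, hz, pass2B, hget, ih]
                · simp [ht, hq, h3, hd, hop, hcl, pass2B, hget, ih]
    · simp [h, pass2B]

-- A's two-flag scanner state corresponds to B's three-state mode (flags never both set).
lemma codeIdx_eq_codeIdxB (s : List Char) :
    ∀ fuel i q t, (t = true → q = false) →
      codeIdx s fuel i q t = codeIdxB s fuel i (if t then 2 else if q then 1 else 0) := by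
  intro fuel
  induction fuel with
  | zero => intro i q t _; simp [codeIdx, codeIdxB]
  | succ n ih =>
    intro i q t hqt
    rw [codeIdx, codeIdxB]
    by_cases h : i < s.length
    · simp only [h, dif_pos]
      by_cases ht : t
      · have hq : q = false := hqt ht
        have e3 := ih (i + 3) false false (fun _ => rfl)
        have e1 := ih (i + 1) false true (fun _ => rfl)
        by_cases h3 : (s.drop i).take 3 = ['"', '"', '"'] <;>
          simp [ht, hq, h3] <;> simpa using (by first | exact e3 | exact e1)
      · by_cases hq : q
        · have e2 := ih (i + 2) true false (fun h => by cases h)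
          have e0 := ih (i + 1) false false (fun _ => rfl)
          have e1 := ih (i + 1) true false (fun h => by cases h)
          by_cases hb : s[i] = '\\'
          · simpa [ht, hq, hb] using e2
          · by_cases hd : s[i] = '"'
            · simpa [ht, hq, hb, hd] using e0
            · simpa [ht, hq, hb, hd] using e1
        · have hq' : q = false := by simpa using hq
          have ht' : t = false := by simpa using ht
          have e3 := ih (i + 3) false true (fun _ => rfl)
          have e1q := ih (i + 1) true false (fun h => by cases h)
          have e1c := ih (i + 1) q t hqt
          by_cases h3 : (s.drop i).take 3 = ['"', '"', '"']
          · simpa [ht, hq, h3] using e3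
          · by_cases hd : s[i] = '"'
            · simpa [ht, hq, h3, hd] using e1q
            · simp only [ht, hq, h3, hd, if_false, ite_false]
              simp only [hq', ht'] at e1c ⊢
              simpa [hq', ht'] using e1c
    · simp [h]

-- The Int sentinel encoding of an optional start index.
def optInt : Option Nat → Int
  | none => -1
  | some k => (k : Int)

-- pass2B with the sentinel equals the fold of stepB with the Option start.
lemma pass2B_eq_foldl (s : List Char) :
    ∀ idxs tuples depth startO,
      pass2B s idxs tuples depth (optInt startO) = (idxs.foldl (stepB s) (tuples, depth, startO)).1 := by
  intro idxs
  induction idxs with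
  | nil => intro tuples depth startO; simp [pass2B]
  | cons i rest ih =>
    intro tuples depth startO
    rw [List.foldl_cons]
    by_cases hop : s[i]?.getD ' ' = '('
    · have hl : pass2B s (i :: rest) tuples depth (optInt startO)
          = pass2B s rest tuples (depth + 1) (optInt (if depth = 0 then some i else startO)) := by
        by_cases hz : depth = 0 <;> simp [pass2B, List.getD, hop, hz, optInt]
      have hs : stepB s (tuples, depth, startO) i
          = (tuples, depth + 1, if depth = 0 then some i else startO) := by
        simp [stepB, List.getD, hop]
      rw [hl, hs, ih]
    · by_cases hcl : s[i]?.getD ' ' = ')'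
      · by_cases hz : depth - 1 = 0 ∧ optInt startO ≥ 0
        · obtain ⟨k, hk⟩ : ∃ k, startO = some k := by
            cases startO with
            | none => simp [optInt] at hz
            | some k => exact ⟨k, rfl⟩
          subst hk
          have hl : pass2B s (i :: rest) tuples depth (optInt (some k))
              = pass2B s rest
                  (tuples ++ [String.ofList (PySem.List.slice s (some ((k : Int))) (some ((i : Int) + 1)))])
                  (depth - 1) (optInt none) := by
            simp [pass2B, List.getD, hcl, hz.1, optInt]
          have hs : stepB s (tuples, depth, some k) i
              = (tuples ++ [String.ofList (PySem.List.slice s (some ((k : Int))) (some ((i : Int) + 1)))],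
                 depth - 1, none) := by
            simp [stepB, List.getD, hop, hcl, hz.1]
          rw [hl, hs, ih]
        · have hl : pass2B s (i :: rest) tuples depth (optInt startO)
              = pass2B s rest tuples (depth - 1) (optInt startO) := by
            simp [pass2B, List.getD, hop, hcl, hz]
          have hs : stepB s (tuples, depth, startO) i = (tuples, depth - 1, startO) := by
            cases startO with
            | none => simp [stepB, List.getD, hop, hcl]
            | some k =>
              have hd1 : ¬ (depth - 1 = 0) := by
                intro hd; exact hz ⟨hd, by simp [optInt]⟩
              simp [stepB, List.getD, hop, hcl, hd1]
          rw [hl, hs, ih]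
      · have hl : pass2B s (i :: rest) tuples depth (optInt startO)
            = pass2B s rest tuples depth (optInt startO) := by
          simp [pass2B, List.getD, hop, hcl]
        have hs : stepB s (tuples, depth, startO) i = (tuples, depth, startO) := by
          simp [stepB, List.getD, hop, hcl]
        rw [hl, hs, ih]

-- ===== VERDICT (by name: the statement is the Claim_ definition above) =====
theorem split_top_level_tuples_py_spec : Claim_equal_split_top_level_tuples_py := by
  intro s _
  unfold Spec_split_top_level_tuples_py split_top_level_tuples_py split_top_level_tuples_py_alt
  rw [loopA_eq_pass2B, codeIdx_eq_codeIdxB s.toList _ _ _ _ (by simp)]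
  show pass2B s.toList (codeIdxB s.toList s.toList.length 0 0) [] 0 (optInt none) = _
  exact pass2B_eq_foldl s.toList _ [] 0 none
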